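-- pv_equiv track=rewrite | github.com/pypi-data/pypi-mirror-35 | packages/fepdf/fepdf-0.1.9-py3-none-any.whl/fepdf.py | fmt_fact
-- ===== SOURCE A (Python) =====
-- TIPOS_FACT = {
--     (1, 6, 11, 19, 51): 'Factura',
--     (2, 7, 12, 20, 52): 'Nota de Débito',
--     (3, 8, 13, 21, 53): 'Nota de Crédito',
--     (4, 9, 15, 54): 'Recibo',
--     (10, 5): 'Nota de Venta al contado',
--     (60, 61): 'Cuenta de Venta y Líquido producto',
--     (63, 64): 'Liquidación',
--     (91, ): 'Remito',
--     (39, 40): '???? (R.G. Nº 3419)'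
-- }
--
-- LETRAS_FACT = {
--     (1, 2, 3, 4, 5, 39, 60, 63): 'A',
--     (6, 7, 8, 9, 10, 40, 61, 64): 'B',
--     (11, 12, 13, 15): 'C',
--     (51, 52, 53, 54): 'M',
--     (19, 20, 21): 'E',
--     (91, ): 'R',
-- }
--
-- def fmt_fact(tipo_cbte, punto_vta, cbte_nro):
--     """Formatea tipo, letra, punto de venta y número de factura"""
--
--     n = "{:04}-{:08}".format(punto_vta, cbte_nro)
--     t = None
--     l = None
--
--     for k, v in TIPOS_FACT.items():
--         if tipo_cbte in k:
--             t = v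
--     for k, v in LETRAS_FACT.items():
--         if tipo_cbte in k:
--             l = v
--
--     return t, l, n
-- ===== SOURCE B (Python) =====
-- # The invoice codes are mostly arithmetic families: within each letter family
-- # the offset from the family's first code picks the document type, so B
-- # classifies by integer ranges and an indexed sequence instead of table scans.
-- _SEQ = ('Factura', 'Nota de D\u00e9bito', 'Nota de Cr\u00e9dito', 'Recibo')
--
--
-- def fmt_fact(tipo_cbte, punto_vta, cbte_nro):
--     """Formatea tipo, letra, punto de venta y número de factura"""
--     n = "%04d-%08d" % (punto_vta, cbte_nro)
--     c = tipo_cbte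
--     t = l = None
--     if 1 <= c <= 4:
--         t, l = _SEQ[c - 1], 'A'
--     elif 6 <= c <= 9:
--         t, l = _SEQ[c - 6], 'B'
--     elif 11 <= c <= 13:
--         t, l = _SEQ[c - 11], 'C'
--     elif 19 <= c <= 21:
--         t, l = _SEQ[c - 19], 'E'
--     elif 51 <= c <= 54:
--         t, l = _SEQ[c - 51], 'M'
--     elif c == 15:
--         t, l = 'Recibo', 'C'
--     elif c == 5 or c == 10:
--         t, l = 'Nota de Venta al contado', 'A' if c == 5 else 'B'
--     elif c == 60 or c == 61:
--         t, l = 'Cuenta de Venta y L\u00edquido producto', 'A' if c == 60 else 'B'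
--     elif c == 63 or c == 64:
--         t, l = 'Liquidaci\u00f3n', 'A' if c == 63 else 'B'
--     elif c == 91:
--         t, l = 'Remito', 'R'
--     elif c == 39 or c == 40:
--         t, l = '???? (R.G. N\u00ba 3419)', 'A' if c == 39 else 'B'
--     return t, l, n
-- ===== Notes on version B (the rewrite author's own statement) =====
-- stated objective: alternative
-- what changed: The two loops scanning tuple-keyed tables are replaced by arithmetic range classification: regular codes fall into letter families (1-4 A, 6-9 B, 11-13 C, 19-21 E, 51-54 M) where the offset from the family's first code indexes the document-type sequence, and the few irregular codes are handled by direct comparisons; no tables are scanned.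
import Mathlib
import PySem

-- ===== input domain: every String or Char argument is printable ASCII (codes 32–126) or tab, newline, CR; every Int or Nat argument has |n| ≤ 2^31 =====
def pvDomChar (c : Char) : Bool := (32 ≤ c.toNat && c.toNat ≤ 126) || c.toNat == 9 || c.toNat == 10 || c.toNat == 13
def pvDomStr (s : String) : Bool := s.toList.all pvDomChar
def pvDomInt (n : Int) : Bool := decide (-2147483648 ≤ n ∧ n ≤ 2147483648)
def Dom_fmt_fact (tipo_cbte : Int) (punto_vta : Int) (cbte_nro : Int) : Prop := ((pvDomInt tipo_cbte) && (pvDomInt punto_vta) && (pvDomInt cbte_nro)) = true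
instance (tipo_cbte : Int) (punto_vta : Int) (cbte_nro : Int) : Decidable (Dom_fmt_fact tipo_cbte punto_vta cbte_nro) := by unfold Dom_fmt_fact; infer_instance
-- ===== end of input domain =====

-- B replaces A's two table-scanning loops by arithmetic range classification:
-- the code's offset within its letter family indexes the document type; objective: alternative.

-- ===== PORT A =====
-- "{:04}-{:08}".format(punto_vta, cbte_nro): zero-padding an int with '{:0w}' is exactly str(n).zfill(w)
def pvFmtNum (punto_vta : Int) (cbte_nro : Int) : String :=
  String.ofList (PySem.Chars.zfill (PySem.Int.toChars punto_vta) 4 ++ ['-'] ++ PySem.Chars.zfill (PySem.Int.toChars cbte_nro) 8)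

def TIPOS_FACT : List (List Int × String) :=
  [([1, 6, 11, 19, 51], "Factura"),
   ([2, 7, 12, 20, 52], "Nota de Débito"),
   ([3, 8, 13, 21, 53], "Nota de Crédito"),
   ([4, 9, 15, 54], "Recibo"),
   ([10, 5], "Nota de Venta al contado"),
   ([60, 61], "Cuenta de Venta y Líquido producto"),
   ([63, 64], "Liquidación"),
   ([91], "Remito"),
   ([39, 40], "???? (R.G. Nº 3419)")]

def LETRAS_FACT : List (List Int × String) :=
  [([1, 2, 3, 4, 5, 39, 60, 63], "A"),
   ([6, 7, 8, 9, 10, 40, 61, 64], "B"),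
   ([11, 12, 13, 15], "C"),
   ([51, 52, 53, 54], "M"),
   ([19, 20, 21], "E"),
   ([91], "R")]

def fmt_fact (tipo_cbte : Int) (punto_vta : Int) (cbte_nro : Int) : Option String × Option String × String :=
  let n := pvFmtNum punto_vta cbte_nro
  let t : Option String := TIPOS_FACT.foldl (fun t kv => if kv.1.contains tipo_cbte then some kv.2 else t) none
  let l : Option String := LETRAS_FACT.foldl (fun l kv => if kv.1.contains tipo_cbte then some kv.2 else l) none
  (t, l, n)

-- ===== PORT B =====
-- _SEQ = ('Factura', 'Nota de Débito', 'Nota de Crédito', 'Recibo')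
def pvSeq : List String := ["Factura", "Nota de Débito", "Nota de Crédito", "Recibo"]

-- the if/elif chain of Source B: range tests plus indexed lookup _SEQ[c - base]
def pvClassify (c : Int) : Option String × Option String :=
  if 1 ≤ c ∧ c ≤ 4 then (PySem.List.pyGet? pvSeq (c - 1), some "A")
  else if 6 ≤ c ∧ c ≤ 9 then (PySem.List.pyGet? pvSeq (c - 6), some "B")
  else if 11 ≤ c ∧ c ≤ 13 then (PySem.List.pyGet? pvSeq (c - 11), some "C")
  else if 19 ≤ c ∧ c ≤ 21 then (PySem.List.pyGet? pvSeq (c - 19), some "E")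
  else if 51 ≤ c ∧ c ≤ 54 then (PySem.List.pyGet? pvSeq (c - 51), some "M")
  else if c = 15 then (some "Recibo", some "C")
  else if c = 5 ∨ c = 10 then (some "Nota de Venta al contado", if c = 5 then some "A" else some "B")
  else if c = 60 ∨ c = 61 then (some "Cuenta de Venta y Líquido producto", if c = 60 then some "A" else some "B")
  else if c = 63 ∨ c = 64 then (some "Liquidación", if c = 63 then some "A" else some "B")
  else if c = 91 then (some "Remito", some "R")
  else if c = 39 ∨ c = 40 then (some "???? (R.G. Nº 3419)", if c = 39 then some "A" else some "B")
  else (none, none)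

def fmt_fact_alt (tipo_cbte : Int) (punto_vta : Int) (cbte_nro : Int) : Option String × Option String × String :=
  let n := pvFmtNum punto_vta cbte_nro
  let tl := pvClassify tipo_cbte
  (tl.1, tl.2, n)

-- ===== PRECONDITION & SPEC =====
def Spec_fmt_fact (tipo_cbte : Int) (punto_vta : Int) (cbte_nro : Int) (out : Option String × Option String × String) : Prop := out = fmt_fact_alt tipo_cbte punto_vta cbte_nro
instance (tipo_cbte : Int) (punto_vta : Int) (cbte_nro : Int) (out : Option String × Option String × String) : Decidable (Spec_fmt_fact tipo_cbte punto_vta cbte_nro out) := by unfold Spec_fmt_fact; infer_instance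

-- ===== CLAIM (what is proved, stated in full; the proofs are below) =====
def Claim_equal_fmt_fact : Prop := ∀ (tipo_cbte : Int) (punto_vta : Int) (cbte_nro : Int), Dom_fmt_fact tipo_cbte punto_vta cbte_nro → Spec_fmt_fact tipo_cbte punto_vta cbte_nro (fmt_fact tipo_cbte punto_vta cbte_nro)

-- ===== LEMMAS AND PROOFS =====
-- A's two table scans agree with B's range classifier: case split on the 28 codes
-- ('decide' each); in the residual case both sides yield (none, none).

theorem classify_eq (c : Int) :
    (TIPOS_FACT.foldl (fun t kv => if kv.1.contains c then some kv.2 else t) none,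
     LETRAS_FACT.foldl (fun l kv => if kv.1.contains c then some kv.2 else l) none)
      = pvClassify c := by
  by_cases e0 : c = 1; · subst e0; decide
  by_cases e1 : c = 2; · subst e1; decide
  by_cases e2 : c = 3; · subst e2; decide
  by_cases e3 : c = 4; · subst e3; decide
  by_cases e4 : c = 5; · subst e4; decide
  by_cases e5 : c = 6; · subst e5; decide
  by_cases e6 : c = 7; · subst e6; decide
  by_cases e7 : c = 8; · subst e7; decide
  by_cases e8 : c = 9; · subst e8; decide
  by_cases e9 : c = 10; · subst e9; decide
  by_cases e10 : c = 11; · subst e10; decide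
  by_cases e11 : c = 12; · subst e11; decide
  by_cases e12 : c = 13; · subst e12; decide
  by_cases e13 : c = 15; · subst e13; decide
  by_cases e14 : c = 19; · subst e14; decide
  by_cases e15 : c = 20; · subst e15; decide
  by_cases e16 : c = 21; · subst e16; decide
  by_cases e17 : c = 39; · subst e17; decide
  by_cases e18 : c = 40; · subst e18; decide
  by_cases e19 : c = 51; · subst e19; decide
  by_cases e20 : c = 52; · subst e20; decide
  by_cases e21 : c = 53; · subst e21; decide
  by_cases e22 : c = 54; · subst e22; decide
  by_cases e23 : c = 60; · subst e23; decide
  by_cases e24 : c = 61; · subst e24; decide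
  by_cases e25 : c = 63; · subst e25; decide
  by_cases e26 : c = 64; · subst e26; decide
  by_cases e27 : c = 91; · subst e27; decide
  unfold pvClassify
  rw [if_neg (by omega), if_neg (by omega), if_neg (by omega), if_neg (by omega),
      if_neg (by omega), if_neg (by omega), if_neg (by omega), if_neg (by omega),
      if_neg (by omega), if_neg (by omega), if_neg (by omega)]
  simp_all [TIPOS_FACT, LETRAS_FACT, List.foldl]

-- ===== VERDICT (by name: the statement is the Claim_ definition above) =====
theorem fmt_fact_spec : Claim_equal_fmt_fact := by
  intro tipo punto cbte _
  unfold Spec_fmt_fact fmt_fact fmt_fact_alt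
  rw [← classify_eq tipo]
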